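-- pv_equiv track=rewrite | github.com/limhizy15/Algorithm_study | programmers/42586.py | solution
-- ===== SOURCE A (Python) =====
-- from collections import deque
-- import math
--
-- def solution(progresses, speeds):
--     answer = []
--     n = len(progresses)
--     days = deque()
--
--     # 걸리는 요일 수 days에 저장
--     for i in range(n):
--         temp_day = math.ceil((100 - progresses[i]) / speeds[i])
--         days.append(temp_day)
--
--     while days:
--         # 맨 앞부터 배포되어야
--         first = days[0]
--         cnt = 1
--         for i in range(1, len(days)):
--             # 배포할 수 없는 상태이므로 break
--             if first < days[i]:
--                 break
--             cnt += 1
--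
--         answer.append(cnt)
--
--         # 배포된 수만큼 days에서 제거
--         for _ in range(cnt):
--             days.popleft()
--
--     return answer
-- ===== SOURCE B (Python) =====
-- def solution(progresses, speeds):
--     # days needed per task, by exact integer ceiling division
--     days = [-(-(100 - p) // s) for p, s in zip(progresses, speeds)]
--     if not days:
--         return []
--     answer = []
--     leader, count = days[0], 1
--     for d in days[1:]:
--         if d <= leader:
--             count += 1
--         else:
--             answer.append(count)
--             leader, count = d, 1
--     answer.append(count)
--     return answer
-- ===== Notes on version B (the rewrite author's own statement) =====
-- stated objective: faster
-- what changed: Replaces the deque with repeated front-rescans and popleft consumption by one linear sweep over the precomputed days list that tracks the current group's leader, and replaces float math.ceil by exact integer ceiling division.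
import Mathlib
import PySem

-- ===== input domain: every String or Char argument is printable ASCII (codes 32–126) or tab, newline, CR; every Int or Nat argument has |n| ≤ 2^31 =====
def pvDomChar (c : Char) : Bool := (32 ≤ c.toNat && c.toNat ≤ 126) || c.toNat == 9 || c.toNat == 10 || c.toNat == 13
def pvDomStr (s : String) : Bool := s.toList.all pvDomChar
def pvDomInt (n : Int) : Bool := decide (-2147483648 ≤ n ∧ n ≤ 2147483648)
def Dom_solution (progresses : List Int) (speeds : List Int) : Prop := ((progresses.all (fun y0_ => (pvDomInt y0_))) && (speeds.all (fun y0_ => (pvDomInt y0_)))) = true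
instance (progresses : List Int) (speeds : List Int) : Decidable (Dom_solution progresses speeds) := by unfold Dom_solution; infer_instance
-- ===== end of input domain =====

-- B replaces A's deque with repeated front-rescans and popleft consumption by one
-- linear sweep tracking the current group's leader (O(n^2) → O(n)), and A's float
-- math.ceil by exact integer ceiling division.

-- ===== PORT A =====
-- inner 'for i in range(1, len(days)): if first < days[i]: break; cnt += 1'
-- (cnt kept as a Nat so the popleft count can drop; appended to answer as Int)
def pvCountA (first : Int) : List Int → Nat
  | [] => 0
  | d :: t => if first < d then 0 else 1 + pvCountA first t

-- 'while days: … answer.append(cnt); popleft cnt times'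
def pvLoopA : List Int → List Int
  | [] => []
  | d :: t =>
      let c := pvCountA d t
      ((1 + c : Nat) : Int) :: pvLoopA (t.drop c)
  termination_by l => l.length
  decreasing_by simp

-- math.ceil((100-p)/s) with |100-p|,|s| within Dom's 2^31 bound is the exact
-- rational ceiling, ported as -((-(100-p)) // s); Pre_ excludes s = 0 (ZeroDivisionError)
-- and out-of-range indexing (IndexError), so the pyGetD default 0 is never relevant.
def solution (progresses : List Int) (speeds : List Int) : List Int :=
  let n : Int := (progresses.length : Int)
  let days : List Int :=
    (PySem.List.pyRange 0 n 1).foldl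
      (fun acc i =>
        acc ++ [-(PySem.Int.floordiv (-(100 - PySem.List.pyGetD progresses i 0))
                   (PySem.List.pyGetD speeds i 0))]) []
  pvLoopA days

-- ===== PORT B =====
def solution_alt (progresses : List Int) (speeds : List Int) : List Int :=
  let days : List Int :=
    (progresses.zip speeds).map (fun x => -(PySem.Int.floordiv (-(100 - x.1)) x.2))
  match days with
  | [] => []
  | d0 :: rest =>
      let st := rest.foldl
        (fun (st : List Int × Int × Int) d =>
          if d ≤ st.2.1 then (st.1, st.2.1, st.2.2 + 1)
          else (st.1 ++ [st.2.2], d, 1))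
        ([], d0, 1)
      st.1 ++ [st.2.2]

-- ===== PRECONDITION & SPEC =====
-- Pre_ excludes exactly the inputs where A raises: an index past the end of speeds
-- (IndexError when speeds is shorter than progresses) and a used speed of 0
-- (ZeroDivisionError).
def Pre_solution (progresses : List Int) (speeds : List Int) : Prop :=
  progresses.length ≤ speeds.length ∧ ∀ x ∈ speeds.take progresses.length, x ≠ 0
instance (progresses : List Int) (speeds : List Int) : Decidable (Pre_solution progresses speeds) := by unfold Pre_solution; infer_instance
def pvWitness_solution : List Int × List Int := ([93, 30, 55], [1, 30, 5])

def Spec_solution (progresses : List Int) (speeds : List Int) (out : List Int) : Prop := out = solution_alt progresses speeds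
instance (progresses : List Int) (speeds : List Int) (out : List Int) : Decidable (Spec_solution progresses speeds out) := by unfold Spec_solution; infer_instance

-- ===== CLAIM (what is proved, stated in full; the proofs are below) =====
def Claim_equal_solution : Prop := ∀ (progresses : List Int) (speeds : List Int), Dom_solution progresses speeds → Pre_solution progresses speeds → Spec_solution progresses speeds (solution progresses speeds)

-- ===== LEMMAS AND PROOFS =====

theorem pvLoopA_nil : pvLoopA [] = [] := by
  rw [pvLoopA.eq_def]

theorem pvLoopA_cons (d : Int) (t : List Int) :
    pvLoopA (d :: t)
      = ((1 + pvCountA d t : Nat) : Int) :: pvLoopA (t.drop (pvCountA d t)) := by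
  rw [pvLoopA.eq_def]

-- the two ports compute the same days list (needs only the length half of Pre_)
theorem pv_days_eq (p s : List Int) (h : p.length ≤ s.length) :
    (PySem.List.pyRange 0 (p.length : Int) 1).map
      (fun i => -(PySem.Int.floordiv (-(100 - PySem.List.pyGetD p i 0))
                   (PySem.List.pyGetD s i 0)))
    = (p.zip s).map (fun x => -(PySem.Int.floordiv (-(100 - x.1)) x.2)) := by
  apply List.ext_getElem
  · simp [PySem.List.length_pyRange_one]; omega
  · intro k h1 h2
    have hk : k < p.length := by
      simpa [PySem.List.length_pyRange_one] using h1
    have hks : k < s.length := lt_of_lt_of_le hk h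
    simp [PySem.List.getElem_pyRange_one, List.getElem_zip,
          List.getD_eq_getElem?_getD, List.getElem?_eq_getElem hk,
          List.getElem?_eq_getElem hks]

-- abstract form of B's one-pass sweep (proof helper)
def pvGrp (leader count : Int) : List Int → List Int
  | [] => [count]
  | d :: t => if d ≤ leader then pvGrp leader (count + 1) t else count :: pvGrp d 1 t

theorem pv_foldl_grp (l : List Int) (acc : List Int) (leader count : Int) :
    (let st := l.foldl
        (fun (st : List Int × Int × Int) d =>
          if d ≤ st.2.1 then (st.1, st.2.1, st.2.2 + 1)
          else (st.1 ++ [st.2.2], d, 1)) (acc, leader, count)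
     st.1 ++ [st.2.2]) = acc ++ pvGrp leader count l := by
  induction l generalizing acc leader count with
  | nil => simp [pvGrp]
  | cons d t ih =>
    by_cases hd : d ≤ leader <;> simp [pvGrp, hd, ih]

theorem pv_grp_loopA (l : List Int) (leader : Int) (c : Int) :
    pvGrp leader c l
      = (c + (pvCountA leader l : Int)) :: pvLoopA (l.drop (pvCountA leader l)) := by
  induction l generalizing leader c with
  | nil => simp [pvGrp, pvCountA, pvLoopA_nil]
  | cons d t ih =>
    by_cases hd : leader < d
    · have hd' : ¬ d ≤ leader := not_le.mpr hd
      rw [pvGrp, if_neg hd', pvCountA, if_pos hd]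
      simp only [Int.natCast_zero, add_zero, List.drop_zero]
      rw [pvLoopA_cons, ih]
      push_cast; ring_nf
    · have hd' : d ≤ leader := not_lt.mp hd
      rw [pvGrp, if_pos hd', pvCountA, if_neg hd, ih, Nat.add_comm 1 (pvCountA leader t)]
      simp only [List.drop_succ_cons]
      push_cast; ring_nf

theorem pv_loopA_eq_sweep (days : List Int) :
    pvLoopA days =
      match days with
      | [] => []
      | d0 :: rest =>
          let st := rest.foldl
            (fun (st : List Int × Int × Int) d =>
              if d ≤ st.2.1 then (st.1, st.2.1, st.2.2 + 1)
              else (st.1 ++ [st.2.2], d, 1)) ([], d0, 1)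
          st.1 ++ [st.2.2] := by
  cases days with
  | nil => simp [pvLoopA_nil]
  | cons d0 rest =>
    dsimp only
    rw [pvLoopA_cons, pv_foldl_grp, pv_grp_loopA]
    push_cast; simp

-- ===== VERDICT (by name: the statement is the Claim_ definition above) =====
theorem solution_spec : Claim_equal_solution := by
  intro p s _ hpre
  show solution p s = solution_alt p s
  simp only [solution, solution_alt]
  rw [PySem.List.foldl_append_singleton_eq_map, List.nil_append,
      pv_days_eq p s hpre.1, pv_loopA_eq_sweep]
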